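-- pv_equiv track=rewrite | github.com/heschmidt04/python-gdi-algorithms | number_stream_counter.py | number_stream_counter
-- ===== SOURCE A (Python) =====
-- def number_stream_counter(number_stream):
--     """
--     Take the number_stream to be passed that includes numbers 2 through 9
--     Determine if there is a consecutive stream of digits on N in length
--     where N is the number of repeats
--     N repeats must at least = N the value
--     So if 5 is N then there must be at least five repeats or more
--         of the number in the stream like : 5,5,5,5,5
--
--
--     :param number_stream: str
--     :return: true if N occurs N times in number_stream - otherwise return false
--
--     input = "5556293383563665" # Not enough of the numbers repeat to number value
--     output False
--
--     input = "5788888888882339999" # 10 number eights are True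
--     output True
--
--     >>> number_stream_counter("5556293383563665")
--     """
--     count = 1
--     number_list = []
--     for i in number_stream:
--         i = int(i)
--         number_list.append(i)
--     for index, i in enumerate(number_list):
--         try:
--             # Only run while the list has a future position
--             if number_list[index] == number_list[index + 1]:
--                 count += 1
--                 if count == number_list[index + 1]:
--                     count = 1
--                     return True
--             if number_list[index] != number_list[index + 1]:
--                 count = 1  # reset the count back to 1 - start over
--         except IndexError:  # if statement would not have a range and would fail
--             pass
--     return False
-- ===== SOURCE B (Python) =====
-- def number_stream_counter(number_stream):
--     # Convert eagerly (preserves ValueError on any non-digit char),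
--     # then scan the stream run by run: a digit d >= 2 whose run length
--     # is at least d means success.
--     nums = [int(c) for c in number_stream]
--     i, n = 0, len(nums)
--     while i < n:
--         j = i
--         while j < n and nums[j] == nums[i]:
--             j += 1
--         if nums[i] >= 2 and j - i >= nums[i]:
--             return True
--         i = j
--     return False
-- ===== Notes on version B (the rewrite author's own statement) =====
-- stated objective: simpler
-- what changed: Replaces A's pairwise adjacent-comparison with an incremental counter (and try/except for the last index) by a direct run-length scan: group each maximal run of equal digits and succeed when a run of digit d>=2 has length >= d.
import Mathlib
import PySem

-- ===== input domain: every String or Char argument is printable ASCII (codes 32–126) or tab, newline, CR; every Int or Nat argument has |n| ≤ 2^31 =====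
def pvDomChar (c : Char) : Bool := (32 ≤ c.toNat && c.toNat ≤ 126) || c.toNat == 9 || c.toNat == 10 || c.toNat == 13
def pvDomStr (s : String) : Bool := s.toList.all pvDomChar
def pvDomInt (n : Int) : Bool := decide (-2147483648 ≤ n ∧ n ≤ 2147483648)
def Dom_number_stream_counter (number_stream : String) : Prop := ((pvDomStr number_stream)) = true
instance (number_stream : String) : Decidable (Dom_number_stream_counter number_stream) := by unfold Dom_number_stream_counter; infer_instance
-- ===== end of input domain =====

-- B replaces A's incremental adjacent-pair counter (with try/except at the end) by a
-- run-length scan over maximal runs of equal digits; equivalence of the RETURN value is proved.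

-- ===== PORT A =====
-- first loop of A: number_list = [int(i) for i in number_stream]; none = ValueError (excluded by Pre_)
def nscToDigits : List Char → Option (List Int)
  | [] => some []
  | c :: rest =>
    match PySem.Int.ofStr? (String.ofList [c]) with
    | none => none
    | some n =>
      match nscToDigits rest with
      | none => none
      | some l => some (n :: l)

-- second loop of A: compare l[index] with l[index+1], incrementing/resetting count;
-- the singleton base case is the last index, where l[index+1] raises IndexError → pass.
def nscScanA : Int → List Int → Bool
  | _, [] => false
  | _, [_] => false
  | count, x :: y :: rest =>
    if x = y then
      let count' := count + 1
      if count' = y then true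
      else nscScanA count' (y :: rest)   -- the second `if x != y` is false here
    else nscScanA 1 (y :: rest)          -- reset count to 1

def number_stream_counter (number_stream : String) : Bool :=
  match nscToDigits number_stream.toList with
  | none => false                        -- ValueError: outside Pre_
  | some l => nscScanA 1 l

-- ===== PORT B =====
-- B's outer while loop: take the maximal run of the head digit (inner while j loop =
-- takeWhile/dropWhile), succeed if the digit is >= 2 and the run is at least that long.
def nscScanB : List Int → Bool
  | [] => false
  | x :: rest =>
    if 2 ≤ x ∧ (1 + ((rest.takeWhile (fun y => y = x)).length : Int)) ≥ x then true
    else nscScanB (rest.dropWhile (fun y => y = x))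
termination_by l => l.length
decreasing_by
  simp only [List.length_cons]
  exact Nat.lt_succ_of_le (List.length_dropWhile_le _ _)

def number_stream_counter_alt (number_stream : String) : Bool :=
  match nscToDigits number_stream.toList with
  | none => false
  | some l => nscScanB l

-- ===== PRECONDITION & SPEC =====
-- Pre_ excludes exactly the inputs with a non-digit character, on which Python A raises ValueError.
def Pre_number_stream_counter (number_stream : String) : Prop :=
  number_stream.toList.all PySem.Chars.isdigit = true
instance (number_stream : String) : Decidable (Pre_number_stream_counter number_stream) := by
  unfold Pre_number_stream_counter; infer_instance
def pvWitness_number_stream_counter : String := "223"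

def Spec_number_stream_counter (number_stream : String) (out : Bool) : Prop := out = number_stream_counter_alt number_stream
instance (number_stream : String) (out : Bool) : Decidable (Spec_number_stream_counter number_stream out) := by unfold Spec_number_stream_counter; infer_instance

-- ===== CLAIM (what is proved, stated in full; the proofs are below) =====
def Claim_equal_number_stream_counter : Prop := ∀ (number_stream : String), Dom_number_stream_counter number_stream → Pre_number_stream_counter number_stream → Spec_number_stream_counter number_stream (number_stream_counter number_stream)

-- ===== LEMMAS AND PROOFS =====

-- Invariant of A's scan: with count = c (1 ≤ c, and c < x unless x ≤ 1), scanning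
-- x :: rest succeeds within the current run iff x ≥ 2 and the run reaches length x
-- counted from c; otherwise it continues exactly as B does on the rest of the stream.
theorem nscScanA_eq (rest : List Int) : ∀ (x c : Int), 1 ≤ c → (c < x ∨ x ≤ 1) →
    nscScanA c (x :: rest) =
      ((decide (2 ≤ x ∧ x ≤ c + ((rest.takeWhile (fun y => y = x)).length : Int))) ||
        nscScanB (rest.dropWhile (fun y => y = x))) := by
  induction rest with
  | nil =>
    intro x c hc hx
    simp only [nscScanA, List.takeWhile_nil, List.dropWhile_nil, List.length_nil,
      Nat.cast_zero, add_zero, nscScanB, Bool.or_false]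
    rw [eq_comm, decide_eq_false_iff_not]
    omega
  | cons y rest ih =>
    intro x c hc hx
    by_cases hxy : x = y
    · -- the run continues
      subst hxy
      have htw : (x :: rest).takeWhile (fun z => z = x) = x :: rest.takeWhile (fun z => z = x) := by
        simp
      have hdw : (x :: rest).dropWhile (fun z => z = x) = rest.dropWhile (fun z => z = x) := by
        simp
      rw [htw, hdw,
        show nscScanA c (x :: x :: rest) =
          (if c + 1 = x then true else nscScanA (c + 1) (x :: rest)) from by simp [nscScanA]]
      have hk : (0 : Int) ≤ ((rest.takeWhile (fun z => z = x)).length : Int) := Int.natCast_nonneg _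
      by_cases hcy : c + 1 = x
      · -- count reaches x: A returns True, and the run is long enough for B's test
        rw [if_pos hcy]
        have hP : 2 ≤ x ∧ x ≤ c + (((x :: rest.takeWhile (fun z => z = x)).length : Nat) : Int) := by
          refine ⟨by omega, ?_⟩
          simp only [List.length_cons]
          push_cast
          omega
        rw [decide_eq_true hP, Bool.true_or]
      · rw [if_neg hcy, ih x (c + 1) (by omega) (by omega)]
        congr 1
        rw [decide_eq_decide]
        simp only [List.length_cons]
        push_cast
        omega
    · -- run ends: A resets count to 1, B moves on to the next run
      have hyx : ¬ y = x := fun h => hxy h.symm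
      have htw : (y :: rest).takeWhile (fun z => z = x) = [] := by
        simp [hyx]
      have hdw : (y :: rest).dropWhile (fun z => z = x) = y :: rest := by
        simp [hyx]
      rw [show nscScanA c (x :: y :: rest) = nscScanA 1 (y :: rest) from by simp [nscScanA, hxy],
        htw, hdw, ih y 1 le_rfl (by omega)]
      have hno : (decide (2 ≤ x ∧ x ≤ c + ((([] : List Int).length : Nat) : Int))) = false := by
        rw [decide_eq_false_iff_not]
        simp only [List.length_nil, Nat.cast_zero, add_zero]
        omega
      rw [hno, Bool.false_or,
        show nscScanB (y :: rest) =
          (if 2 ≤ y ∧ (1 + ((rest.takeWhile (fun z => z = y)).length : Int)) ≥ y then true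
           else nscScanB (rest.dropWhile (fun z => z = y))) from by rw [nscScanB]]
      by_cases hb : 2 ≤ y ∧ y ≤ 1 + ((rest.takeWhile (fun z => z = y)).length : Int)
      · rw [if_pos ⟨hb.1, hb.2⟩, decide_eq_true hb]
        simp
      · rw [if_neg (fun h => hb ⟨h.1, h.2⟩), decide_eq_false hb, Bool.false_or]

theorem nscScan_agree (l : List Int) : nscScanA 1 l = nscScanB l := by
  cases l with
  | nil => simp [nscScanA, nscScanB]
  | cons x rest =>
    rw [nscScanA_eq rest x 1 le_rfl (by omega),
      show nscScanB (x :: rest) =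
        (if 2 ≤ x ∧ (1 + ((rest.takeWhile (fun y => y = x)).length : Int)) ≥ x then true
         else nscScanB (rest.dropWhile (fun y => y = x))) from by rw [nscScanB]]
    by_cases hb : 2 ≤ x ∧ x ≤ 1 + ((rest.takeWhile (fun y => y = x)).length : Int)
    · rw [if_pos ⟨hb.1, hb.2⟩, decide_eq_true hb]
      simp
    · rw [if_neg (fun h => hb ⟨h.1, h.2⟩), decide_eq_false hb, Bool.false_or]

-- ===== VERDICT (by name: the statement is the Claim_ definition above) =====
theorem number_stream_counter_spec : Claim_equal_number_stream_counter := by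
  intro s _ _
  unfold Spec_number_stream_counter number_stream_counter number_stream_counter_alt
  cases nscToDigits s.toList with
  | none => rfl
  | some l => exact nscScan_agree l
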